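-- pv_equiv track=rewrite | github.com/isaromo/Programacion1UTN | 5_FUNCIONES/TP5/functionsTP5.py | phrase_to_dictionary
-- ===== SOURCE A (Python) =====
-- def phrase_to_dictionary(phrase):
--     start = 0
--     dictionary = {}
--
--     for i in range(0, len(phrase)):
--         if phrase[i] == " ":    #si phrase[i] es un espacio, entonces lo anterior es una palabra.
--             word = phrase[start : i]    #obtengo la palabra desde la posición de comienzo hasta el espacio
--             start = (i+1)     #reseteo la posición de comienzo a ese espacio encontrado
--
--             dictionary[word] = len(word)
--
--         elif i == (len(phrase)-1):    #También considero el caso de que en vez de un espacio, sea el final de la oración (es decir i == longitud de la frase (menos 1))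
--             word = phrase[start : i+1]
--             dictionary[word] = len(word)
--
--     return dictionary
-- ===== SOURCE B (Python) =====
-- def phrase_to_dictionary(phrase):
--     words = phrase.split(" ")
--     if words and words[-1] == "":
--         words.pop()
--     return {w: len(w) for w in words}
-- ===== Notes on version B (the rewrite author's own statement) =====
-- stated objective: idiomatic
-- what changed: Replaces A's manual indexed character scan (tracking a start position and slicing out a word at each space and at the final index) by library tokenization: phrase.split(" ") with the one trailing empty piece dropped, then a dict comprehension mapping each word to its length.
import Mathlib
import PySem

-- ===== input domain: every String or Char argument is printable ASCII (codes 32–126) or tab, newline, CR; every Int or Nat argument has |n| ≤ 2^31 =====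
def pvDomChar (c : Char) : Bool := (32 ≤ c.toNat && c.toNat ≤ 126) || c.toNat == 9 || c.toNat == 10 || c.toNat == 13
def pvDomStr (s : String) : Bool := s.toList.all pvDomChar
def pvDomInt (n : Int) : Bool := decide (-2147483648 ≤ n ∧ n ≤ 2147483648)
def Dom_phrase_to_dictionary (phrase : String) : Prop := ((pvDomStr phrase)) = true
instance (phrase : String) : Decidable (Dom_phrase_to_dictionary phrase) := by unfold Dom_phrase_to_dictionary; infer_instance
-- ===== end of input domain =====

-- B replaces A's manual indexed character scan by library tokenization (split on " ",
-- dropping the one trailing empty piece a final space produces) followed by a dict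
-- comprehension over the words: same return value, a more idiomatic decomposition.

-- ===== PORT A =====
-- literal transliteration of A: loop over i in range(0, len(phrase)) with state (start, dictionary)
def phrase_to_dictionary (phrase : String) : List (String × Int) :=
  let n := PySem.Str.len phrase
  let res := (PySem.List.pyRange 0 n 1).foldl
    (fun (st : Int × PySem.Dict String Int) (i : Int) =>
      -- phrase[i]: i is always in range here, so pyGet? is some; ' ' is the unreachable default
      let c := (PySem.Str.pyGet? phrase i).getD ' '
      if c = ' ' then
        let word := PySem.Str.slice phrase (some st.1) (some i)
        (i + 1, st.2.insert word (PySem.Str.len word))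
      else if i = n - 1 then
        let word := PySem.Str.slice phrase (some st.1) (some (i + 1))
        (st.1, st.2.insert word (PySem.Str.len word))
      else st)
    ((0 : Int), PySem.Dict.empty)
  res.2.items

-- ===== PORT B =====
-- literal transliteration of B: words = phrase.split(" "); drop one trailing ""; dict comprehension
def phrase_to_dictionary_alt (phrase : String) : List (String × Int) :=
  let words := (PySem.Chars.splitOn phrase.toList [' ']).map String.ofList  -- phrase.split(" ")
  let words := if words.getLast? = some "" then words.dropLast else words   -- if words and words[-1] == "": words.pop()
  (words.foldl (fun (d : PySem.Dict String Int) w => d.insert w (PySem.Str.len w)) PySem.Dict.empty).items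

-- ===== PRECONDITION & SPEC =====
def Spec_phrase_to_dictionary (phrase : String) (out : List (String × Int)) : Prop := out = phrase_to_dictionary_alt phrase
instance (phrase : String) (out : List (String × Int)) : Decidable (Spec_phrase_to_dictionary phrase out) := by unfold Spec_phrase_to_dictionary; infer_instance

-- ===== CLAIM (what is proved, stated in full; the proofs are below) =====
def Claim_equal_phrase_to_dictionary : Prop := ∀ (phrase : String), Dom_phrase_to_dictionary phrase → Spec_phrase_to_dictionary phrase (phrase_to_dictionary phrase)

-- ===== LEMMAS AND PROOFS =====

-- the word list A's scan effectively inserts: pend = characters scanned since the last space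
def pvTokens : List Char → List Char → List (List Char)
  | _, [] => []
  | pend, c :: rest =>
      if c = ' ' then pend :: pvTokens [] rest
      else if rest = [] then [pend ++ [c]]
      else pvTokens (pend ++ [c]) rest

-- str.split(" ") as a plain structural recursion (pend = current piece)
def pvSplit : List Char → List Char → List (List Char)
  | pend, [] => [pend]
  | pend, c :: rest => if c = ' ' then pend :: pvSplit [] rest else pvSplit (pend ++ [c]) rest

theorem pvGetLast?_cons {α : Type} (x : α) (l : List α) (h : l ≠ []) : (x :: l).getLast? = l.getLast? := by
  cases l with | nil => simp_all | cons a t => simp [List.getLast?_cons_cons]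

theorem pvSplit_ne_nil (pend rest : List Char) : pvSplit pend rest ≠ [] := by
  induction rest generalizing pend with
  | nil => simp [pvSplit]
  | cons c r ih => by_cases h : c = ' ' <;> simp [pvSplit, h, ih]

theorem pvSplit_go (fuel : Nat) (rest cur acc) (h : rest.length ≤ fuel) :
    PySem.Chars.splitOn.go [' '] fuel rest cur acc = acc.reverse ++ pvSplit cur.reverse rest := by
  induction fuel generalizing rest cur acc with
  | zero =>
      have : rest = [] := by cases rest <;> simp_all
      subst this
      simp [PySem.Chars.splitOn.go, pvSplit]
  | succ f ih =>
      cases rest with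
      | nil => simp [PySem.Chars.splitOn.go, pvSplit]
      | cons c r =>
          by_cases hc : c = ' '
          · subst hc
            have hp : [' '].isPrefixOf (' ' :: r) = true := by simp [List.isPrefixOf]
            simp only [PySem.Chars.splitOn.go, hp, if_true, List.length_cons, List.length_nil,
              Nat.zero_add, List.drop_succ_cons, List.drop_zero]
            rw [ih r [] (List.reverse cur :: acc) (by simpa using Nat.le_of_succ_le_succ h)]
            simp [pvSplit]
          · have hp : [' '].isPrefixOf (c :: r) = false := by
              simp [List.isPrefixOf]; exact fun hh => absurd hh.symm hc
            simp only [PySem.Chars.splitOn.go, hp, Bool.false_eq_true, if_false]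
            rw [ih r (c :: cur) acc (by simpa using Nat.le_of_succ_le_succ h)]
            simp [pvSplit, hc]

theorem pvSplitOn_eq (cs : List Char) : PySem.Chars.splitOn cs [' '] = pvSplit [] cs := by
  unfold PySem.Chars.splitOn
  simpa using pvSplit_go (cs.length + 1) cs [] [] (by omega)

-- A's token list = split(" ") with the single trailing empty piece dropped
theorem pvTokens_eq_adjust (pend rest : List Char) (hp : rest = [] → pend = []) :
    pvTokens pend rest =
      (if (pvSplit pend rest).getLast? = some [] then (pvSplit pend rest).dropLast else pvSplit pend rest) := by
  induction rest generalizing pend with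
  | nil => simp [hp rfl, pvTokens, pvSplit]
  | cons c r ih =>
      by_cases hc : c = ' '
      · subst hc
        have h2 := ih [] (fun _ => rfl)
        have hne := pvSplit_ne_nil [] r
        simp only [pvTokens, pvSplit, if_true]
        rw [h2]
        rw [pvGetLast?_cons _ _ hne, List.dropLast_cons_of_ne_nil hne]
        split <;> rfl
      · cases r with
        | nil =>
            simp [pvTokens, pvSplit, hc]
        | cons c' r' =>
            have h2 := ih (pend ++ [c]) (by simp)
            simp only [pvTokens, pvSplit, if_neg hc]
            simp only [if_neg (by simp : ¬(c' :: r' = ([] : List Char)))]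
            exact h2

-- the main loop invariant: A's fold over the remaining indices inserts exactly pvTokens pend rest
theorem pvLoop (phrase : String) (rest pend pre : List Char) (d : PySem.Dict String Int)
    (hsplit : phrase.toList = pre ++ pend ++ rest) :
    ((PySem.List.pyRange ((pre.length : Int) + (pend.length : Int)) (PySem.Str.len phrase) 1).foldl
      (fun (st : Int × PySem.Dict String Int) (i : Int) =>
        let c := (PySem.Str.pyGet? phrase i).getD ' '
        if c = ' ' then
          let word := PySem.Str.slice phrase (some st.1) (some i)
          (i + 1, st.2.insert word (PySem.Str.len word))
        else if i = PySem.Str.len phrase - 1 then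
          let word := PySem.Str.slice phrase (some st.1) (some (i + 1))
          (st.1, st.2.insert word (PySem.Str.len word))
        else st)
      (((pre.length : Int)), d)).2
    = (pvTokens pend rest).foldl (fun d w => d.insert (String.ofList w) ((w.length : Int))) d := by
  have hn : PySem.Str.len phrase = ((phrase.toList.length : Nat) : Int) := by
    simpa using PySem.Str.len_eq phrase
  induction rest generalizing pend pre d with
  | nil =>
      have hlen : phrase.toList.length = pre.length + pend.length := by
        rw [hsplit]; simp
      rw [PySem.List.pyRange_one_eq_nil (by rw [hn, hlen]; push_cast; omega)]
      simp [pvTokens]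
  | cons c r ih =>
      have hlen : phrase.toList.length = pre.length + pend.length + (r.length + 1) := by
        rw [hsplit]; simp; omega
      have hi : ((pre.length : Int) + (pend.length : Int)) < PySem.Str.len phrase := by
        rw [hn, hlen]; push_cast; omega
      rw [PySem.List.pyRange_one_cons hi, List.foldl_cons]
      have hget : (PySem.Str.pyGet? phrase ((pre.length : Int) + (pend.length : Int))).getD ' ' = c := by
        have : ((pre.length : Int) + (pend.length : Int)) = (((pre.length + pend.length : Nat)) : Int) := by push_cast; ring
        rw [this]
        simp only [PySem.Str.pyGet?, PySem.Chars.pyGet?_eq_listPyGet?]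
        rw [PySem.List.pyGet?_natCast]
        rw [hsplit, List.getElem?_append_right (by simp)]
        simp
      have hword : PySem.Str.slice phrase (some (pre.length : Int)) (some ((pre.length : Int) + (pend.length : Int)))
          = String.ofList pend := by
        rw [show PySem.Str.slice phrase (some (pre.length : Int)) (some ((pre.length : Int) + (pend.length : Int))) = String.ofList (PySem.Str.slice phrase (some (pre.length : Int)) (some ((pre.length : Int) + (pend.length : Int)))).toList from (String.ofList_toList).symm]
        congr 1
        rw [PySem.Str.toList_slice, PySem.Chars.slice_eq_listSlice, PySem.List.slice_natCast_add,
          hsplit, List.append_assoc, List.drop_left]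
        exact List.take_left
      have hwlen : ∀ s : String, PySem.Str.len s = ((s.toList.length : Nat) : Int) := fun s => by
        simpa using PySem.Str.len_eq s
      by_cases hc : c = ' '
      · subst hc
        have key := ih [] (pre ++ pend ++ [' ']) (d.insert (String.ofList pend) ((pend.length : Int)))
          (by rw [hsplit]; simp)
        simp only [List.length_append, List.length_cons, List.length_nil, Nat.zero_add] at key
        have e2 : ((pre.length + pend.length + 1 : Nat) : Int) + ((0 : Nat) : Int) = (pre.length : Int) + (pend.length : Int) + 1 := by
          push_cast; ring
        have e1 : ((pre.length + pend.length + 1 : Nat) : Int) = (pre.length : Int) + (pend.length : Int) + 1 := by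
          push_cast; ring
        rw [e2, e1] at key
        simp only [hget, if_pos rfl, hword, hwlen, String.toList_ofList]
        rw [show pvTokens pend (' ' :: r) = pend :: pvTokens [] r from by simp [pvTokens], List.foldl_cons]
        exact key
      · cases r with
        | nil =>
            have hlast : ((pre.length : Int) + (pend.length : Int)) = PySem.Str.len phrase - 1 := by
              rw [hn, hlen]; simp only [List.length_nil]; push_cast; ring
            have hword2 : PySem.Str.slice phrase (some (pre.length : Int)) (some (((pre.length : Int) + (pend.length : Int)) + 1))
                = String.ofList (pend ++ [c]) := by
              rw [show PySem.Str.slice phrase (some (pre.length : Int)) (some ((pre.length : Int) + (pend.length : Int) + 1)) = String.ofList (PySem.Str.slice phrase (some (pre.length : Int)) (some ((pre.length : Int) + (pend.length : Int) + 1))).toList from (String.ofList_toList).symm]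
              congr 1
              rw [PySem.Str.toList_slice, PySem.Chars.slice_eq_listSlice]
              rw [show ((pre.length : Int) + (pend.length : Int) + 1) = ((pre.length : Int) + ((pend.length + 1 : Nat) : Int)) from by push_cast; ring]
              rw [PySem.List.slice_natCast_add, hsplit, List.append_assoc, List.drop_left]
              exact List.take_of_length_le (by simp)
            have hc2 : ((pre.length : Int) + (pend.length : Int)) = (phrase.toList.length : Int) - 1 := by
              rw [hlen]; simp only [List.length_nil]; push_cast; ring
            simp only [hget, if_neg hc, hword2, hwlen, String.toList_ofList]
            rw [PySem.List.pyRange_one_eq_nil (by rw [hlen]; simp only [List.length_nil]; push_cast; omega)]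
            simp only [List.foldl_nil, pvTokens, if_neg hc, List.foldl_cons]
            rw [if_pos hc2]
            simp
        | cons c' r' =>
            have hnotlast : ¬ ((pre.length : Int) + (pend.length : Int)) = PySem.Str.len phrase - 1 := by
              rw [hn, hlen]; simp only [List.length_cons, List.length_nil]; push_cast; omega
            have key := ih (pend ++ [c]) pre d (by rw [hsplit]; simp)
            simp only [List.length_append, List.length_cons, List.length_nil, Nat.zero_add] at key
            have e3 : (pre.length : Int) + ((pend.length + 1 : Nat) : Int) = (pre.length : Int) + (pend.length : Int) + 1 := by
              push_cast; ring
            rw [e3] at key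
            simp only [hget, if_neg hc, if_neg hnotlast]
            rw [show pvTokens pend (c :: c' :: r') = pvTokens (pend ++ [c]) (c' :: r') from by
              simp [pvTokens, hc]]
            exact key

theorem pvOfList_eq_empty_iff (w : List Char) : String.ofList w = "" ↔ w = [] := by
  constructor
  · intro h
    have := congrArg String.toList h
    simpa using this
  · rintro rfl; rfl

theorem phrase_to_dictionary_spec' (phrase : String) :
    phrase_to_dictionary phrase = phrase_to_dictionary_alt phrase := by
  have hwlen : ∀ w : List Char, PySem.Str.len (String.ofList w) = ((w.length : Nat) : Int) := by
    intro w; rw [PySem.Str.len_eq]; simp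
  have h := pvLoop phrase phrase.toList [] [] PySem.Dict.empty (by simp)
  simp only [List.length_nil, Nat.cast_zero, add_zero, zero_add] at h
  show (phrase_to_dictionary phrase) = _
  unfold phrase_to_dictionary phrase_to_dictionary_alt
  dsimp only
  rw [pvSplitOn_eq, h, pvTokens_eq_adjust [] phrase.toList (fun _ => rfl)]
  by_cases hlast : (pvSplit [] phrase.toList).getLast? = some ([] : List Char)
  · rw [if_pos hlast, if_pos (by rw [List.getLast?_map, hlast]; rfl)]
    rw [← List.map_dropLast]
    simp only [List.foldl_map, hwlen]
  · rw [if_neg hlast, if_neg (by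
      rw [List.getLast?_map]
      intro hcon
      rcases Option.map_eq_some_iff.mp hcon with ⟨w, hw, hw2⟩
      exact hlast (by rw [hw, (pvOfList_eq_empty_iff w).mp hw2]))]
    simp only [List.foldl_map, hwlen]

-- ===== VERDICT (by name: the statement is the Claim_ definition above) =====
theorem phrase_to_dictionary_spec : Claim_equal_phrase_to_dictionary := by
  intro phrase _
  exact phrase_to_dictionary_spec' phrase
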